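-- pv_equiv track=rewrite | github.com/illinoisdata/kishu | kishu/kishu/optimization/change.py | find_created_and_deleted_vars
-- ===== SOURCE A (Python) =====
-- def find_created_and_deleted_vars(pre_execution, post_execution):
--     """
--         Find created and deleted variables through computing a difference of the user namespace pre and post execution.
--     """
--     created_variables = set()
--     deleted_variables = set()
--
--     # New variables
--     for varname in post_execution.difference(pre_execution):
--         if not varname.startswith('_'):
--             created_variables.add(varname)
--
--     # Deleted variables
--     for varname in pre_execution.difference(post_execution):
--         if not varname.startswith('_'):
--             deleted_variables.add(varname)
--
--     return created_variables, deleted_variables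
-- ===== SOURCE B (Python) =====
-- def find_created_and_deleted_vars(pre_execution, post_execution):
--     """
--         Find created and deleted variables through computing a difference of the user namespace pre and post execution.
--     """
--     # Mark every pre-execution variable as a deletion candidate, then sweep the
--     # post-execution namespace: a variable seen again is unchanged (drop its mark),
--     # an unseen one is a creation candidate. No set.difference is computed.
--     status = {}
--     for varname in pre_execution:
--         status[varname] = False          # False = candidate deleted
--     for varname in post_execution:
--         if varname in status:
--             del status[varname]          # present in both: unchanged
--         else:
--             status[varname] = True       # True = candidate created
--
--     created_variables = set()
--     deleted_variables = set()
--     for varname, is_created in status.items():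
--         if varname.startswith('_'):
--             continue
--         if is_created:
--             created_variables.add(varname)
--         else:
--             deleted_variables.add(varname)
--     return created_variables, deleted_variables
-- ===== Notes on version B (the rewrite author's own statement) =====
-- stated objective: alternative
-- what changed: B never computes a set difference: it builds a dict marking each pre-execution name as a deletion candidate, cancels or creates marks in one sweep over post_execution, and finally partitions the surviving marks into the two result sets.
import Mathlib
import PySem

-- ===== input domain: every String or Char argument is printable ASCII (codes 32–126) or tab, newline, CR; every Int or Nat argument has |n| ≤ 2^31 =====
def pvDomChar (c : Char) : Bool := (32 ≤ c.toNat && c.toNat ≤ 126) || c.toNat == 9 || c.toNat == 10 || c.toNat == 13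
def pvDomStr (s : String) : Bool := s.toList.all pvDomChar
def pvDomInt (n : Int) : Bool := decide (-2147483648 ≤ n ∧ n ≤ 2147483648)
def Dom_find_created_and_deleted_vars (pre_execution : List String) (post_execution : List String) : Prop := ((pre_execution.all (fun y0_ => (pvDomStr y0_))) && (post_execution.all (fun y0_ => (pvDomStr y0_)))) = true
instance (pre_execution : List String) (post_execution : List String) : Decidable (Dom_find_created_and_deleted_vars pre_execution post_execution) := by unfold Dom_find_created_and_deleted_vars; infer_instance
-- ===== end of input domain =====

-- B replaces A's two set differences with a mark-and-sweep dict (pre names marked as deletion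
-- candidates, post names cancelling or creating marks), partitioned at the end; objective: alternative.


-- ===== PORT A =====
-- Set-typed parameters arrive as lists of distinct elements; Set.ofList models the set they denote.
def find_created_and_deleted_vars (pre_execution : List String) (post_execution : List String) : List String × List String :=
  let preS : PySem.Set String := PySem.Set.ofList pre_execution
  let postS : PySem.Set String := PySem.Set.ofList post_execution
  -- New variables
  let created_variables : PySem.Set String :=
    (PySem.Set.diff postS preS).foldl
      (fun (s : PySem.Set String) varname =>
        if !(PySem.Str.startswith varname "_") then PySem.Set.add s varname else s)
      PySem.Set.empty
  -- Deleted variables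
  let deleted_variables : PySem.Set String :=
    (PySem.Set.diff preS postS).foldl
      (fun (s : PySem.Set String) varname =>
        if !(PySem.Str.startswith varname "_") then PySem.Set.add s varname else s)
      PySem.Set.empty
  (created_variables, deleted_variables)

-- ===== PORT B =====
-- Set-typed parameters arrive as lists of distinct elements; Set.ofList models the set they denote.
def find_created_and_deleted_vars_alt (pre_execution : List String) (post_execution : List String) : List String × List String :=
  let preS : PySem.Set String := PySem.Set.ofList pre_execution
  let postS : PySem.Set String := PySem.Set.ofList post_execution
  -- status[v] = False: deletion candidate; True: creation candidate
  let status0 : PySem.Dict String Bool :=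
    preS.foldl (fun d varname => d.insert varname false) PySem.Dict.empty
  let status : PySem.Dict String Bool :=
    postS.foldl
      (fun d varname => if d.contains varname then d.erase varname else d.insert varname true)
      status0
  status.items.foldl
    (fun (acc : PySem.Set String × PySem.Set String) p =>
      if PySem.Str.startswith p.1 "_" then acc
      else if p.2 then (PySem.Set.add acc.1 p.1, acc.2)
      else (acc.1, PySem.Set.add acc.2 p.1))
    (PySem.Set.empty, PySem.Set.empty)

-- ===== PRECONDITION & SPEC =====
def Spec_find_created_and_deleted_vars (pre_execution : List String) (post_execution : List String) (out : List String × List String) : Prop := out = find_created_and_deleted_vars_alt pre_execution post_execution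
instance (pre_execution : List String) (post_execution : List String) (out : List String × List String) : Decidable (Spec_find_created_and_deleted_vars pre_execution post_execution out) := by unfold Spec_find_created_and_deleted_vars; infer_instance

-- ===== CLAIM (what is proved, stated in full; the proofs are below) =====
def Claim_equal_find_created_and_deleted_vars : Prop := ∀ (pre_execution : List String) (post_execution : List String), Dom_find_created_and_deleted_vars pre_execution post_execution → Spec_find_created_and_deleted_vars pre_execution post_execution (find_created_and_deleted_vars pre_execution post_execution)

-- ===== LEMMAS AND PROOFS =====

-- The mark-and-sweep loop of B, run from a dict of False-marks pl and True-marks tl,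
-- erases the False-marks seen again and appends True-marks for the fresh names.
theorem pv_sweep (l : List String) (pl tl : List String)
    (hl : l.Nodup) (hpl : pl.Nodup)
    (htp : ∀ v ∈ tl, v ∉ pl) (htl : ∀ v ∈ tl, v ∉ l) :
    (l.foldl
      (fun (d : PySem.Dict String Bool) varname =>
        if d.contains varname then d.erase varname else d.insert varname true)
      (PySem.Dict.mk (pl.map (fun v => (v, false)) ++ tl.map (fun v => (v, true))))).items
    = (pl.filter (fun v => v ∉ l)).map (fun v => (v, false))
      ++ (tl ++ l.filter (fun v => v ∉ pl)).map (fun v => (v, true)) := by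
  induction l generalizing pl tl with
  | nil => simp
  | cons x xs ih =>
    have hxxs : x ∉ xs := (List.nodup_cons.1 hl).1
    have hxs : xs.Nodup := hl.of_cons
    have hxtl : x ∉ tl := fun h => htl x h (List.mem_cons_self)
    rw [List.foldl_cons]
    have hcont : (PySem.Dict.mk (pl.map (fun v => (v, false)) ++ tl.map (fun v => (v, true)))).contains x
        = decide (x ∈ pl) := by
      simp only [PySem.Dict.contains, List.any_append, List.any_map, Function.comp_def]
      by_cases h : x ∈ pl
      · simp_all [List.any_eq_true, beq_iff_eq]
      · simp_all [beq_iff_eq]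
        exact fun v hv hvx => h (hvx ▸ hv)
    by_cases hxpl : x ∈ pl
    · rw [hcont, if_pos (by simpa using hxpl)]
      have herase : (PySem.Dict.mk (pl.map (fun v => (v, false)) ++ tl.map (fun v => (v, true)))).erase x
          = PySem.Dict.mk ((pl.filter (fun v => !(v == x))).map (fun v => (v, false))
              ++ tl.map (fun v => (v, true))) := by
        simp only [PySem.Dict.erase, List.filter_append, List.filter_map]
        congr 2
        rw [List.filter_eq_self.2]
        intro a ha
        simp only [Function.comp]
        simp [show a ≠ x from fun h => hxtl (h ▸ ha)]
      rw [herase]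
      rw [ih (pl.filter (fun v => !(v == x))) tl hxs (hpl.filter _)
        (fun v hv hmem => htp v hv (List.mem_of_mem_filter hmem))
        (fun v hv => fun h => htl v hv (List.mem_cons_of_mem _ h))]
      congr 1
      · congr 1
        rw [List.filter_filter]
        apply List.filter_congr
        intro v hv
        by_cases hvx : v = x
        · simp [hvx]
        · simp [hvx, List.mem_cons]
      · congr 1
        congr 1
        rw [List.filter_cons_of_neg (by simp [hxpl])]
        apply List.filter_congr
        intro v hv
        have hvx : v ≠ x := fun h => hxxs (h ▸ hv)
        simp [List.mem_filter, hvx]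
    · rw [hcont, if_neg (by simpa using hxpl)]
      rw [show (PySem.Dict.mk (pl.map (fun v => (v, false)) ++ tl.map (fun v => (v, true)))).insert x true
          = PySem.Dict.mk (pl.map (fun v => (v, false)) ++ (tl ++ [x]).map (fun v => (v, true))) from by
        rw [PySem.Dict.insert]
        rw [if_neg (by rw [hcont]; simpa using hxpl)]
        simp [List.append_assoc]]
      rw [ih pl (tl ++ [x]) hxs hpl
        (by intro v hv; rcases List.mem_append.1 hv with h | h
            · exact htp v h
            · simpa [List.mem_singleton.1 h] using hxpl)
        (by intro v hv; rcases List.mem_append.1 hv with h | h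
            · exact fun hm => htl v h (List.mem_cons_of_mem _ hm)
            · simpa [List.mem_singleton.1 h] using hxxs)]
      congr 1
      · congr 1
        apply List.filter_congr
        intro v hv
        have hvx : v ≠ x := fun h => hxpl (h ▸ hv)
        simp [List.mem_cons, hvx]
      · rw [List.filter_cons_of_pos (by simpa using hxpl)]
        simp [List.append_assoc]

-- Partitioning a block of False-marked items only feeds the deleted side, exactly like A's step.
theorem pv_part_false (l : List String) (c d : PySem.Set String) (rest : List (String × Bool)) :
    ((l.map (fun v => (v, false)) ++ rest).foldl
      (fun (acc : PySem.Set String × PySem.Set String) p =>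
        if PySem.Str.startswith p.1 "_" then acc
        else if p.2 then (PySem.Set.add acc.1 p.1, acc.2)
        else (acc.1, PySem.Set.add acc.2 p.1)) (c, d))
    = (rest.foldl
        (fun (acc : PySem.Set String × PySem.Set String) p =>
          if PySem.Str.startswith p.1 "_" then acc
          else if p.2 then (PySem.Set.add acc.1 p.1, acc.2)
          else (acc.1, PySem.Set.add acc.2 p.1))
        (c, l.foldl
          (fun (s : PySem.Set String) varname =>
            if !(PySem.Str.startswith varname "_") then PySem.Set.add s varname else s) d)) := by
  induction l generalizing d with
  | nil => rfl
  | cons x xs ih =>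
    simp only [List.map_cons, List.cons_append, List.foldl_cons]
    by_cases hs : PySem.Str.startswith x "_" = true
    · rw [if_pos hs]
      have hns : (!PySem.Str.startswith x "_") = false := by rw [hs]; rfl
      rw [hns, if_neg (by simp)]
      exact ih d
    · have hs' : PySem.Str.startswith x "_" = false := Bool.eq_false_iff.2 hs
      rw [if_neg hs, if_neg (by simp)]
      have hns : (!PySem.Str.startswith x "_") = true := by rw [hs']; rfl
      rw [hns, if_pos rfl]
      exact ih (PySem.Set.add d x)

-- Partitioning a block of True-marked items only feeds the created side, exactly like A's step.
theorem pv_part_true (l : List String) (c d : PySem.Set String) :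
    ((l.map (fun v => (v, true))).foldl
      (fun (acc : PySem.Set String × PySem.Set String) p =>
        if PySem.Str.startswith p.1 "_" then acc
        else if p.2 then (PySem.Set.add acc.1 p.1, acc.2)
        else (acc.1, PySem.Set.add acc.2 p.1)) (c, d))
    = (l.foldl
        (fun (s : PySem.Set String) varname =>
          if !(PySem.Str.startswith varname "_") then PySem.Set.add s varname else s) c, d) := by
  induction l generalizing c with
  | nil => rfl
  | cons x xs ih =>
    simp only [List.map_cons, List.foldl_cons]
    by_cases hs : PySem.Str.startswith x "_" = true
    · rw [if_pos hs]
      have hns : (!PySem.Str.startswith x "_") = false := by rw [hs]; rfl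
      rw [hns, if_neg (by simp)]
      exact ih c
    · have hs' : PySem.Str.startswith x "_" = false := Bool.eq_false_iff.2 hs
      rw [if_neg hs]
      simp only [if_true]
      have hns : (!PySem.Str.startswith x "_") = true := by rw [hs']; rfl
      rw [hns, if_pos rfl]
      exact ih (PySem.Set.add c x)

-- ===== VERDICT (by name: the statement is the Claim_ definition above) =====
theorem find_created_and_deleted_vars_spec : Claim_equal_find_created_and_deleted_vars := by
  intro pre post _
  unfold Spec_find_created_and_deleted_vars
  unfold find_created_and_deleted_vars find_created_and_deleted_vars_alt
  simp only []
  set preS := PySem.Set.ofList pre with hpre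
  set postS := PySem.Set.ofList post with hpost
  have hnpre : preS.Nodup := PySem.Set.nodup_ofList pre
  have hnpost : postS.Nodup := PySem.Set.nodup_ofList post
  have h0 : (preS.foldl (fun d varname => d.insert varname false) PySem.Dict.empty)
      = PySem.Dict.mk (preS.map (fun v => (v, false)) ++ ([] : List String).map (fun v => (v, true))) := by
    apply PySem.Dict.ext
    have := PySem.Dict.items_foldl_insert_fresh (l := preS) (k := fun a => a)
      (v := fun _ => false) (d := PySem.Dict.empty)
      (fun a _ => PySem.Dict.contains_empty a) (by simpa using hnpre)
    simpa using this
  rw [h0, pv_sweep postS preS [] hnpost hnpre (by simp) (by simp), List.nil_append,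
    pv_part_false, pv_part_true]
  have hdiff1 : PySem.Set.diff postS preS = postS.filter (fun v => decide (v ∉ preS)) := by
    apply List.filter_congr
    intro v _
    simp
  have hdiff2 : PySem.Set.diff preS postS = preS.filter (fun v => decide (v ∉ postS)) := by
    apply List.filter_congr
    intro v _
    simp
  rw [hdiff1, hdiff2]
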